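-- pv_equiv track=rewrite | github.com/JUMINAHN/TIL | Algorithm/Python/IM_test/SWEA/0830/swea1974_check.py | check_nine
-- ===== SOURCE A (Python) =====
-- def check_nine(check_sum, sdcou, N):
--     #result = 0
--     for j in range(0, N, 3): #total2를 확인안해도 될까?
--         for i in range(0, N, 3):
--             total = 0
--             for row in range(0+j, 3+j):
--                 for col in range(0+i,3+i):
--                     total += sdcou[row][col]
--             if total != check_sum:
--                 return False
--     return True
-- ===== SOURCE B (Python) =====
-- def check_nine(check_sum, sdcou, N):
--     box_sums = {}
--     for r in range(N):
--         row = sdcou[r]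
--         for c in range(N):
--             key = (r // 3, c // 3)
--             box_sums[key] = box_sums.get(key, 0) + row[c]
--     return all(s == check_sum for s in box_sums.values())
-- ===== Notes on version B (the rewrite author's own statement) =====
-- stated objective: alternative
-- what changed: Replaces A's box-by-box nested 3x3 summation with early return by a single row-major pass over the N x N board accumulating per-box sums into a dict keyed by (r//3, c//3), then one all() check over the accumulated sums; Pre_ excludes N > 0 not divisible by 3 (A reads 3x3 blocks past the N x N board, an accident of its loop bounds) and boards smaller than N x N (A may return an early False before reaching a missing cell, while B visits every cell and raises).
-- outside the precondition, e.g. on check_nine(99, [[1, 1, 1], [1, 1, 1], [1, 1, 1]], 6): A returns False, B raises IndexError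
import Mathlib
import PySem

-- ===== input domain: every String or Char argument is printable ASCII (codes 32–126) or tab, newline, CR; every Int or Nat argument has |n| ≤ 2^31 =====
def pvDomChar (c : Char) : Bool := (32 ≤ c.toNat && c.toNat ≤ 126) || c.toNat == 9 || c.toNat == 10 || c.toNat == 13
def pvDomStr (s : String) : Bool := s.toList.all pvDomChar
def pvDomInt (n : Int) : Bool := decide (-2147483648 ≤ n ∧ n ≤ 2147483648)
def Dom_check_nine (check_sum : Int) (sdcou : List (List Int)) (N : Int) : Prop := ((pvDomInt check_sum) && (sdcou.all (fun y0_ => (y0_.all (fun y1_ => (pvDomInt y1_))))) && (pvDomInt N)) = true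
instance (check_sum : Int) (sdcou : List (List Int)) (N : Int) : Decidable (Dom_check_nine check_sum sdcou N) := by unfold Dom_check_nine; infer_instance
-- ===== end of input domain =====

-- B replaces A's box-by-box summation with early return by one row-major pass over the N×N board
-- accumulating per-box sums into a dict keyed by (r//3, c//3), then a single all() check
-- (objective: alternative).

-- ===== PORT A =====
-- sdcou[row][col]; pyGetD's default is only reached where Python raises IndexError (excluded by Pre_)
def pvCellA (sdcou : List (List Int)) (row col : Int) : Int :=
  PySem.List.pyGetD (PySem.List.pyGetD sdcou row []) col 0

-- 'total = 0; for row in range(0+j, 3+j): for col in range(0+i, 3+i): total += sdcou[row][col]'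
def pvBoxTotal (sdcou : List (List Int)) (j i : Int) : Int :=
  (PySem.List.pyRange (0 + j) (3 + j) 1).foldl (fun total row =>
    (PySem.List.pyRange (0 + i) (3 + i) 1).foldl (fun t col =>
      t + pvCellA sdcou row col) total) 0

-- inner 'for i in range(0, N, 3)' with its early 'return False'
def pvCheckI (check_sum : Int) (sdcou : List (List Int)) (j : Int) : List Int → Bool
  | [] => true
  | i :: rest => if pvBoxTotal sdcou j i ≠ check_sum then false else pvCheckI check_sum sdcou j rest

-- outer 'for j in range(0, N, 3)'; a False from the inner loop is returned at once
def pvCheckJ (check_sum : Int) (sdcou : List (List Int)) (ilist : List Int) : List Int → Bool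
  | [] => true
  | j :: rest => if pvCheckI check_sum sdcou j ilist then pvCheckJ check_sum sdcou ilist rest else false

def check_nine (check_sum : Int) (sdcou : List (List Int)) (N : Int) : Bool :=
  pvCheckJ check_sum sdcou (PySem.List.pyRange 0 N 3) (PySem.List.pyRange 0 N 3)

-- ===== PORT B =====
-- box_sums[key] = box_sums.get(key, 0) + row[c], dict keyed by (r//3, c//3)
def check_nine_alt (check_sum : Int) (sdcou : List (List Int)) (N : Int) : Bool :=
  let box_sums := (PySem.List.pyRange 0 N 1).foldl (fun d r =>
    let row := PySem.List.pyGetD sdcou r []   -- row = sdcou[r]; default only where Python raises (outside Pre_)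
    (PySem.List.pyRange 0 N 1).foldl (fun d2 c =>
      let key := (PySem.Int.floordiv r 3, PySem.Int.floordiv c 3)
      d2.insert key (d2.getD key 0 + PySem.List.pyGetD row c 0)) d)
    PySem.Dict.empty
  box_sums.values.all (fun s => s == check_sum)

-- ===== PRECONDITION & SPEC =====
-- Pre_ restricts to the natural sudoku domain: N ≤ 0 or N a multiple of 3 with a board covering N×N.
-- It excludes N > 0 not divisible by 3, where A's value is an accident of its loop bounds (it reads
-- 3×3 blocks past the N×N board and raises IndexError on an exactly-N×N board), and boards smaller
-- than N×N, where A may return an early False before reaching a missing cell while B visits every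
-- cell and raises IndexError.
def Pre_check_nine (check_sum : Int) (sdcou : List (List Int)) (N : Int) : Prop :=
  N ≤ 0 ∨ (N % 3 = 0 ∧ N ≤ (sdcou.length : Int) ∧
    ∀ row ∈ sdcou.take N.toNat, N ≤ (row.length : Int))
instance (check_sum : Int) (sdcou : List (List Int)) (N : Int) : Decidable (Pre_check_nine check_sum sdcou N) := by unfold Pre_check_nine; infer_instance

def pvWitness_check_nine : Int × List (List Int) × Int :=
  (9, List.replicate 9 (List.replicate 9 1), 9)

def Spec_check_nine (check_sum : Int) (sdcou : List (List Int)) (N : Int) (out : Bool) : Prop := out = check_nine_alt check_sum sdcou N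
instance (check_sum : Int) (sdcou : List (List Int)) (N : Int) (out : Bool) : Decidable (Spec_check_nine check_sum sdcou N out) := by unfold Spec_check_nine; infer_instance

-- ===== CLAIM (what is proved, stated in full; the proofs are below) =====
def Claim_equal_check_nine : Prop := ∀ (check_sum : Int) (sdcou : List (List Int)) (N : Int), Dom_check_nine check_sum sdcou N → Pre_check_nine check_sum sdcou N → Spec_check_nine check_sum sdcou N (check_nine check_sum sdcou N)

-- ===== LEMMAS AND PROOFS =====

-- proof-side cell / box sum
def gcell (sd : List (List Int)) (r c : Nat) : Int := (sd.getD r []).getD c 0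

def gbox (sd : List (List Int)) (jb ib : Nat) : Int :=
  gcell sd (3*jb) (3*ib) + gcell sd (3*jb) (3*ib+1) + gcell sd (3*jb) (3*ib+2)
  + gcell sd (3*jb+1) (3*ib) + gcell sd (3*jb+1) (3*ib+1) + gcell sd (3*jb+1) (3*ib+2)
  + gcell sd (3*jb+2) (3*ib) + gcell sd (3*jb+2) (3*ib+1) + gcell sd (3*jb+2) (3*ib+2)

theorem cellA_cast (sd : List (List Int)) (r c : Nat) :
    pvCellA sd (r : Int) (c : Int) = gcell sd r c := by
  simp [pvCellA, gcell, PySem.List.pyGetD_natCast]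

theorem boxTotal_cast (sd : List (List Int)) (jb ib : Nat) :
    pvBoxTotal sd (3*(jb : Int)) (3*(ib : Int)) = gbox sd jb ib := by
  have h3 : ∀ (j : Int), PySem.List.pyRange (0 + j) (3 + j) 1 = [j, j+1, j+2] := by
    intro j
    rw [PySem.List.pyRange_one]
    have h : (3 + j - (0 + j)).toNat = 3 := by omega
    rw [h]
    simp [List.range_succ]
  rw [pvBoxTotal, h3, h3]
  simp only [List.foldl]
  have e : ∀ (a b : Nat) (x y : Int), x = 3*(jb:Int) + (a:Int) → y = 3*(ib:Int) + (b:Int) →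
      pvCellA sd x y = gcell sd (3*jb+a) (3*ib+b) := by
    intro a b x y hx hy
    have hx' : x = ((3*jb+a : Nat) : Int) := by push_cast; omega
    have hy' : y = ((3*ib+b : Nat) : Int) := by push_cast; omega
    rw [hx', hy', cellA_cast]
  rw [e 0 0 _ _ (by push_cast; ring) (by push_cast; ring),
      e 0 1 _ _ (by push_cast; ring) (by push_cast; ring),
      e 0 2 _ _ (by push_cast; ring) (by push_cast; ring),
      e 1 0 _ _ (by push_cast; ring) (by push_cast; ring),
      e 1 1 _ _ (by push_cast; ring) (by push_cast; ring),
      e 1 2 _ _ (by push_cast; ring) (by push_cast; ring),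
      e 2 0 _ _ (by push_cast; ring) (by push_cast; ring),
      e 2 1 _ _ (by push_cast; ring) (by push_cast; ring),
      e 2 2 _ _ (by push_cast; ring) (by push_cast; ring)]
  simp [gbox]

theorem checkI_all (cs : Int) (sd : List (List Int)) (j : Int) (il : List Int) :
    pvCheckI cs sd j il = il.all (fun i => pvBoxTotal sd j i == cs) := by
  induction il with
  | nil => rfl
  | cons i rest ih =>
    rw [pvCheckI, ih]
    by_cases h : pvBoxTotal sd j i = cs <;> simp [h]

theorem checkJ_all (cs : Int) (sd : List (List Int)) (il jl : List Int) :
    pvCheckJ cs sd il jl = jl.all (fun j => il.all (fun i => pvBoxTotal sd j i == cs)) := by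
  induction jl with
  | nil => rfl
  | cons j rest ih =>
    rw [pvCheckJ, ih, checkI_all]
    cases hq : il.all (fun i => pvBoxTotal sd j i == cs) <;> simp [hq]

-- the accumulate-into-dict step, keyed: final lookup = initial lookup + sum of matching values
theorem dict_fold_getD {α : Type} (key : α → Int × Int) (val : α → Int) (l : List α)
    (d : PySem.Dict (Int × Int) Int) (k : Int × Int) :
    (l.foldl (fun d p => d.insert (key p) (d.getD (key p) 0 + val p)) d).getD k 0
      = d.getD k 0 + ((l.filter (fun p => key p == k)).map val).sum := by
  induction l generalizing d with
  | nil => simp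
  | cons a rest ih =>
    rw [List.foldl_cons, List.filter_cons, ih]
    by_cases h : key a = k
    · subst h
      rw [PySem.Dict.getD_insert_self]
      simp
      ring
    · rw [PySem.Dict.getD_insert, if_neg (fun he => h he.symm)]
      simp [h]

theorem flatMap_if_filter {α β : Type} (l : List α) (q : α → Bool) (h : α → List β) :
    (l.flatMap fun x => if q x then h x else []) = (l.filter q).flatMap h := by
  induction l with
  | nil => rfl
  | cons x rest ih =>
    rw [List.flatMap_cons, List.filter_cons]
    by_cases hq : q x <;> simp [hq, ih]

theorem filter_range_div3 (Kn t : Nat) (ht : t < Kn) :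
    (List.range (3*Kn)).filter (fun c => c / 3 == t) = [3*t, 3*t+1, 3*t+2] := by
  refine List.Perm.eq_of_pairwise (le := (· < ·)) (fun a b _ _ h1 h2 => by omega)
    (List.pairwise_lt_range.filter _) (by simp) ?_
  rw [List.perm_ext_iff_of_nodup ((List.nodup_range).filter _) (by simp)]
  intro a
  simp [List.mem_filter]
  omega

theorem flatMap_congr_mem {α β : Type} (l : List α) (f g : α → List β)
    (h : ∀ a ∈ l, f a = g a) : l.flatMap f = l.flatMap g := by
  induction l with
  | nil => rfl
  | cons x rest ih => simp_all

-- cells of the flat row-major list whose box key is (jb, ib)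
theorem cells_filter (Kn jb ib : Nat) (hj : jb < Kn) (hi : ib < Kn) :
    (((List.range (3*Kn)).flatMap (fun r => (List.range (3*Kn)).map (fun c => (r, c)))).filter
        (fun a => a.1/3 == jb && a.2/3 == ib))
      = [3*jb, 3*jb+1, 3*jb+2].flatMap (fun r => [(r, 3*ib), (r, 3*ib+1), (r, 3*ib+2)]) := by
  rw [List.filter_flatMap]
  have hmid : ∀ r ∈ List.range (3*Kn),
      ((List.range (3*Kn)).map (fun c => (r, c))).filter (fun a => a.1/3 == jb && a.2/3 == ib)
        = if r/3 == jb then [(r, 3*ib), (r, 3*ib+1), (r, 3*ib+2)] else [] := by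
    intro r hr
    rw [List.filter_map]
    by_cases hrj : r/3 = jb
    · have : (List.range (3*Kn)).filter ((fun a => a.1/3 == jb && a.2/3 == ib) ∘ (fun c => (r, c)))
          = [3*ib, 3*ib+1, 3*ib+2] := by
        rw [← filter_range_div3 Kn ib hi]
        apply List.filter_congr
        intro c hc
        simp [Function.comp, hrj]
      rw [this, if_pos (by simp [hrj])]
      rfl
    · have : (List.range (3*Kn)).filter ((fun a => a.1/3 == jb && a.2/3 == ib) ∘ (fun c => (r, c)))
          = [] := by
        apply List.filter_eq_nil_iff.mpr
        intro c hc
        simp [Function.comp, hrj]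
      rw [this, if_neg (by simp [hrj])]
      rfl
  rw [flatMap_congr_mem _ _ _ hmid, flatMap_if_filter, filter_range_div3 Kn jb hj]

-- flattening the two nested loops into one fold over the flat cell list
theorem foldl_nested {σ : Type} (F : σ → Nat × Nat → σ) (l₁ l₂ : List Nat) (init : σ) :
    l₁.foldl (fun s r => l₂.foldl (fun s2 c => F s2 (r, c)) s) init
      = (l₁.flatMap (fun r => l₂.map (fun c => (r, c)))).foldl F init := by
  induction l₁ generalizing init with
  | nil => rfl
  | cons r rest ih => rw [List.foldl_cons, List.flatMap_cons, List.foldl_append, List.foldl_map, ih]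

theorem floordiv_cast3 (r : Nat) : PySem.Int.floordiv (r : Int) 3 = ((r/3 : Nat) : Int) := by
  exact_mod_cast PySem.Int.floordiv_natCast r 3

-- B on an N = 3·Kn board, characterised through the per-box sums gbox
theorem alt_eq (cs : Int) (sd : List (List Int)) (Kn : Nat) :
    check_nine_alt cs sd ((3*Kn : Nat) : Int)
      = (List.range Kn).all (fun jb =>
          (List.range Kn).all (fun ib => gbox sd jb ib == cs)) := by
  simp only [check_nine_alt]
  simp only [PySem.List.pyRange_zero_natCast, List.foldl_map]
  have hbody : ∀ (d : PySem.Dict (Int × Int) Int) (r : Nat),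
      (List.range (3*Kn)).foldl (fun d2 (c : Nat) =>
          d2.insert (PySem.Int.floordiv (r:Int) 3, PySem.Int.floordiv (c:Int) 3)
            (d2.getD (PySem.Int.floordiv (r:Int) 3, PySem.Int.floordiv (c:Int) 3) 0
              + PySem.List.pyGetD (PySem.List.pyGetD sd (r:Int) []) (c:Int) 0)) d
        = (List.range (3*Kn)).foldl (fun d2 c =>
            d2.insert (((r/3 : Nat) : Int), ((c/3 : Nat) : Int))
              (d2.getD (((r/3 : Nat) : Int), ((c/3 : Nat) : Int)) 0 + gcell sd r c)) d := by
    intro d r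
    apply PySem.List.foldl_congr_mem
    intro acc c _
    rw [floordiv_cast3, floordiv_cast3]
    simp [gcell, PySem.List.pyGetD_natCast]
  simp only [hbody]
  rw [show (fun (d : PySem.Dict (Int × Int) Int) (r : Nat) => (List.range (3*Kn)).foldl (fun d2 c =>
        d2.insert (((r/3 : Nat) : Int), ((c/3 : Nat) : Int))
          (d2.getD (((r/3 : Nat) : Int), ((c/3 : Nat) : Int)) 0 + gcell sd r c)) d)
      = (fun d r => (List.range (3*Kn)).foldl
          (fun d2 c => (fun (d3 : PySem.Dict (Int × Int) Int) (a : Nat × Nat) =>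
            d3.insert (((a.1/3 : Nat) : Int), ((a.2/3 : Nat) : Int))
              (d3.getD (((a.1/3 : Nat) : Int), ((a.2/3 : Nat) : Int)) 0 + gcell sd a.1 a.2)) d2 (r, c)) d) from rfl]
  rw [foldl_nested (fun (d3 : PySem.Dict (Int × Int) Int) (a : Nat × Nat) =>
        d3.insert (((a.1/3 : Nat) : Int), ((a.2/3 : Nat) : Int))
          (d3.getD (((a.1/3 : Nat) : Int), ((a.2/3 : Nat) : Int)) 0 + gcell sd a.1 a.2))
      (List.range (3*Kn)) (List.range (3*Kn)) PySem.Dict.empty]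
  set cells := (List.range (3*Kn)).flatMap (fun r => (List.range (3*Kn)).map (fun c => (r, c))) with hcells
  set key : Nat × Nat → Int × Int := fun a => (((a.1/3 : Nat) : Int), ((a.2/3 : Nat) : Int)) with hkey
  set val : Nat × Nat → Int := fun a => gcell sd a.1 a.2 with hval
  set D := cells.foldl (fun d3 a => d3.insert (key a) (d3.getD (key a) 0 + val a)) PySem.Dict.empty with hD
  -- keys of D, their uniqueness, and the value at each key
  have hkeys : D.keys = PySem.Set.update PySem.Dict.empty.keys (cells.map key) :=
    PySem.Dict.keys_foldl_insert_key cells key (fun d3 a => d3.getD (key a) 0 + val a) PySem.Dict.empty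
  have hnd : D.keys.Nodup :=
    PySem.Dict.nodup_keys_foldl_insert_key cells key (fun d3 a => d3.getD (key a) 0 + val a)
      PySem.Dict.empty (by simp [PySem.Dict.keys_empty])
  have hmemkeys : ∀ k, k ∈ D.keys ↔ k ∈ cells.map key := by
    intro k
    rw [hkeys]
    have : PySem.Set.update (PySem.Dict.empty : PySem.Dict (Int × Int) Int).keys (cells.map key)
        = PySem.Set.ofList (cells.map key) := by
      simp [PySem.Set.update, PySem.Set.ofList_eq_foldl, PySem.Dict.keys_empty]
    rw [this, PySem.Set.mem_ofList]
  have hgetD : ∀ jb ib, jb < Kn → ib < Kn →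
      D.getD ((jb : Int), (ib : Int)) 0 = gbox sd jb ib := by
    intro jb ib hj hi
    rw [hD, dict_fold_getD key val cells]
    rw [PySem.Dict.getD_empty]
    have hfe : cells.filter (fun p => key p == ((jb : Int), (ib : Int)))
        = cells.filter (fun a => a.1/3 == jb && a.2/3 == ib) := by
      apply List.filter_congr
      intro a _
      rw [Bool.eq_iff_iff]
      simp [hkey, Prod.ext_iff]
      omega
    rw [hfe, hcells, cells_filter Kn jb ib hj hi]
    simp [hval, gbox]
    ring
  -- turn 'all over values' into 'all over keys'
  rw [PySem.Dict.values_eq_map_keys D hnd 0, List.all_map]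
  rw [Bool.eq_iff_iff]
  simp only [List.all_eq_true, beq_iff_eq, List.mem_range, Function.comp]
  constructor
  · intro hall jb hjb ib hib
    have hmem : ((jb : Int), (ib : Int)) ∈ D.keys := by
      rw [hmemkeys]
      refine List.mem_map.mpr ⟨(3*jb, 3*ib), ?_, ?_⟩
      · rw [hcells]
        simp only [List.mem_flatMap, List.mem_map, List.mem_range]
        exact ⟨3*jb, by omega, ⟨3*ib, by omega, rfl⟩⟩
      · simp [hkey]
    have := hall _ hmem
    rwa [hgetD jb ib hjb hib] at this
  · intro hbox k hk
    rw [hmemkeys] at hk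
    rcases List.mem_map.mp hk with ⟨a, ha, rfl⟩
    rw [hcells] at ha
    simp only [List.mem_flatMap, List.mem_map, List.mem_range] at ha
    rcases ha with ⟨r, hr, c, hc, rfl⟩
    have hj : r/3 < Kn := by omega
    have hi : c/3 < Kn := by omega
    rw [hkey]
    rw [hgetD _ _ hj hi]
    exact hbox _ hj _ hi

theorem a_eq (cs : Int) (sd : List (List Int)) (Kn : Nat) :
    check_nine cs sd ((3*Kn : Nat) : Int)
      = (List.range Kn).all (fun jb =>
          (List.range Kn).all (fun ib => gbox sd jb ib == cs)) := by
  have hr : PySem.List.pyRange 0 ((3*Kn : Nat) : Int) 3 = (List.range Kn).map (fun (k : Nat) => 3*(k:Int)) := by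
    rw [PySem.List.pyRange_of_pos 0 _ (by omega : (0:Int) < 3)]
    by_cases h : Kn = 0
    · subst h
      rw [if_neg (by norm_num)]
      simp
    · rw [if_pos (by push_cast; omega)]
      have he : ((((3*Kn : Nat) : Int) - 0 + 3 - 1) / 3).toNat = Kn := by push_cast; omega
      rw [he]
      exact List.map_congr_left (fun k _ => by omega)
  rw [check_nine, checkJ_all, hr]
  simp only [List.all_map]
  congr 1
  funext jb
  simp only [Function.comp]
  congr 1
  funext ib
  simp only [Function.comp]
  rw [boxTotal_cast]

-- for N ≤ 0 both programs run empty loops and return True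
theorem ports_agree_nonpos (cs : Int) (sd : List (List Int)) (N : Int) (h : N ≤ 0) :
    check_nine cs sd N = true ∧ check_nine_alt cs sd N = true := by
  have h3 : PySem.List.pyRange 0 N 3 = [] := by
    rw [PySem.List.pyRange_of_pos 0 N (by omega : (0:Int) < 3), if_neg (by omega)]
    simp
  have h1 : PySem.List.pyRange 0 N 1 = [] := by
    rw [PySem.List.pyRange_of_pos 0 N (by omega : (0:Int) < 1), if_neg (by omega)]
    simp
  constructor
  · rw [check_nine, h3]
    rfl
  · simp only [check_nine_alt, h1]
    rfl

-- ===== VERDICT (by name: the statement is the Claim_ definition above) =====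
theorem check_nine_spec : Claim_equal_check_nine := by
  intro cs sd N _ hpre
  unfold Spec_check_nine
  rcases hpre with h | ⟨h3, -⟩
  · rcases ports_agree_nonpos cs sd N h with ⟨ha, hb⟩
    rw [ha, hb]
  · by_cases h0 : N ≤ 0
    · rcases ports_agree_nonpos cs sd N h0 with ⟨ha, hb⟩
      rw [ha, hb]
    · have hN : N = ((3 * (N / 3).toNat : Nat) : Int) := by push_cast; omega
      rw [hN, a_eq, alt_eq]
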